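-- pv_equiv track=rewrite | github.com/drixs2050/Mortal | mortal/bc_conversion_bench.py | deterministic_round_robin_sample
-- ===== SOURCE A (Python) =====
-- def deterministic_round_robin_sample(items: list[str], sample_size: int) -> list[str]:
--     total = len(items)
--     if sample_size <= 0:
--         raise ValueError('sample_size must be positive')
--     if sample_size >= total:
--         return list(items)
--     return [
--         items[(idx * total) // sample_size]
--         for idx in range(sample_size)
--     ]
-- ===== SOURCE B (Python) =====
-- def deterministic_round_robin_sample(items: list[str], sample_size: int) -> list[str]:
--     total = len(items)
--     if sample_size <= 0:
--         raise ValueError('sample_size must be positive')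
--     if sample_size >= total:
--         return list(items)
--     step = total // sample_size
--     drift = total % sample_size
--     acc = 0
--     rem = 0
--     out = []
--     for _ in range(sample_size):
--         out.append(items[acc])
--         acc += step
--         rem += drift
--         if rem >= sample_size:
--             rem -= sample_size
--             acc += 1
--     return out
-- ===== Notes on version B (the rewrite author's own statement) =====
-- stated objective: alternative
-- what changed: Replaces the per-element closed-form index (idx*total)//sample_size with an incremental Bresenham/DDA-style loop that maintains the current index and a remainder accumulator, so no multiplication or division happens per element.
import Mathlib
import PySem

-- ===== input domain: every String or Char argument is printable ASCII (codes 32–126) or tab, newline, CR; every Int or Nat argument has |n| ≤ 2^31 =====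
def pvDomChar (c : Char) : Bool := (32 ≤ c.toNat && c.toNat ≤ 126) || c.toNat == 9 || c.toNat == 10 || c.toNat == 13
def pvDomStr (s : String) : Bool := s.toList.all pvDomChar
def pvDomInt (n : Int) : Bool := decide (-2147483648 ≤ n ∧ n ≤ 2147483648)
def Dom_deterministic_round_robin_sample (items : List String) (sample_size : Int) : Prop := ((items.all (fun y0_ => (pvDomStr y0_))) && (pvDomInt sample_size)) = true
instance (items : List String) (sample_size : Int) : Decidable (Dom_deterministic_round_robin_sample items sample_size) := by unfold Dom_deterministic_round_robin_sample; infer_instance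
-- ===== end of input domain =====

-- B replaces the per-element multiply-and-floor-divide index with an incremental
-- Bresenham-style index/remainder loop (alternative decomposition, same cost).

-- ===== PORT A =====
-- pyGetD is exact here: in the comprehension branch 0 ≤ idx < sample_size < total,
-- so the index (idx*total)//sample_size is always in range and Python never raises IndexError.
def deterministic_round_robin_sample (items : List String) (sample_size : Int) : List String :=
  let total : Int := items.length
  if sample_size ≤ 0 then []       -- Python raises ValueError here; excluded by Pre_
  else if sample_size ≥ total then items
  else (PySem.List.pyRange 0 sample_size 1).map
        (fun idx => PySem.List.pyGetD items (PySem.Int.floordiv (idx * total) sample_size) "")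

-- ===== PORT B =====
-- the 'for _ in range(sample_size)' loop of Source B, state (acc, rem, out):
-- append items[acc], then acc += step; rem += drift; if rem >= ss: rem -= ss; acc += 1
def drrLoop (items : List String) (ss step drift : Int) :
    Nat → Int → Int → List String → List String
  | 0, _, _, out => out
  | n+1, acc, rem, out =>
    if rem + drift ≥ ss then
      drrLoop items ss step drift n (acc + step + 1) (rem + drift - ss)
        (out ++ [PySem.List.pyGetD items acc ""])
    else
      drrLoop items ss step drift n (acc + step) (rem + drift)
        (out ++ [PySem.List.pyGetD items acc ""])

def deterministic_round_robin_sample_alt (items : List String) (sample_size : Int) : List String :=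
  let total : Int := items.length
  if sample_size ≤ 0 then []       -- Python raises ValueError here; excluded by Pre_
  else if sample_size ≥ total then items
  else
    let step := PySem.Int.floordiv total sample_size
    let drift := PySem.Int.mod total sample_size
    drrLoop items sample_size step drift sample_size.toNat 0 0 []

-- ===== PRECONDITION & SPEC =====
-- A raises ValueError exactly when sample_size ≤ 0; those inputs are excluded.
def Pre_deterministic_round_robin_sample (items : List String) (sample_size : Int) : Prop :=
  0 < sample_size
instance (items : List String) (sample_size : Int) : Decidable (Pre_deterministic_round_robin_sample items sample_size) := by unfold Pre_deterministic_round_robin_sample; infer_instance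

def pvWitness_deterministic_round_robin_sample : List String × Int := (["a", "b", "c"], 2)

def Spec_deterministic_round_robin_sample (items : List String) (sample_size : Int) (out : List String) : Prop := out = deterministic_round_robin_sample_alt items sample_size
instance (items : List String) (sample_size : Int) (out : List String) : Decidable (Spec_deterministic_round_robin_sample items sample_size out) := by unfold Spec_deterministic_round_robin_sample; infer_instance

-- ===== CLAIM (what is proved, stated in full; the proofs are below) =====
def Claim_equal_deterministic_round_robin_sample : Prop := ∀ (items : List String) (sample_size : Int), Dom_deterministic_round_robin_sample items sample_size → Pre_deterministic_round_robin_sample items sample_size → Spec_deterministic_round_robin_sample items sample_size (deterministic_round_robin_sample items sample_size)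

-- ===== LEMMAS AND PROOFS =====

-- Invariant of B's loop: starting from the exact quotient/remainder of k*T by S,
-- n steps of the Bresenham loop produce the n closed-form indices of A.
lemma drrLoop_inv (items : List String) (S T step drift : Int) (hS : 0 < S)
    (hstep : step * S + drift = T) (hd0 : 0 ≤ drift) (hd1 : drift < S) :
    ∀ (n : Nat) (k q r : Int) (out : List String),
      k * T = q * S + r → 0 ≤ r → r < S →
      drrLoop items S step drift n q r out =
        out ++ (List.range n).map
          (fun i : Nat => PySem.List.pyGetD items (PySem.Int.floordiv ((k + (i : Int)) * T) S) "") := by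
  intro n
  induction n with
  | zero => intro k q r out _ _ _; simp [drrLoop]
  | succ m ih =>
    intro k q r out hkq hr0 hr1
    have hq : PySem.Int.floordiv (k * T) S = q := by
      rw [PySem.Int.floordiv_eq_iff_of_pos hS, hkq]
      constructor <;> nlinarith
    simp only [drrLoop]
    rw [List.range_succ_eq_map]
    simp only [List.map_cons, List.map_map, Nat.cast_zero, add_zero, hq]
    by_cases hc : r + drift ≥ S
    · rw [if_pos hc,
         ih (k + 1) (q + step + 1) (r + drift - S) _
           (by linear_combination hkq - hstep) (by omega) (by omega)]
      simp only [List.append_assoc, List.singleton_append]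
      congr 2
      apply List.map_congr_left
      intro i _
      simp only [Function.comp_apply]
      congr 2
      push_cast
      ring
    · rw [if_neg hc,
         ih (k + 1) (q + step) (r + drift) _
           (by linear_combination hkq - hstep) (by omega) (by omega)]
      simp only [List.append_assoc, List.singleton_append]
      congr 2
      apply List.map_congr_left
      intro i _
      simp only [Function.comp_apply]
      congr 2
      push_cast
      ring

-- ===== VERDICT (by name: the statement is the Claim_ definition above) =====
theorem deterministic_round_robin_sample_spec : Claim_equal_deterministic_round_robin_sample := by
  intro items sample_size _ hpre
  unfold Spec_deterministic_round_robin_sample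
  unfold deterministic_round_robin_sample deterministic_round_robin_sample_alt
  have hS : ¬ sample_size ≤ 0 := not_le.mpr hpre
  simp only [hS, if_false]
  by_cases hge : sample_size ≥ (items.length : Int)
  · simp [hge]
  · simp only [hge, if_false]
    set T : Int := (items.length : Int) with hT
    have hS0 : 0 < sample_size := hpre
    have hdm := PySem.Int.floordiv_mul_add_mod T sample_size
    have hme := PySem.Int.mod_eq_emod_of_pos (a := T) hS0
    have hm0 : 0 ≤ PySem.Int.mod T sample_size := by
      rw [hme]; exact Int.emod_nonneg T (by omega)
    have hm1 : PySem.Int.mod T sample_size < sample_size := by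
      rw [hme]; exact Int.emod_lt_of_pos T hS0
    rw [drrLoop_inv items sample_size T (PySem.Int.floordiv T sample_size)
          (PySem.Int.mod T sample_size) hS0 hdm hm0 hm1 sample_size.toNat 0 0 0 []
          (by ring) le_rfl hS0]
    rw [PySem.List.pyRange_one 0 sample_size]
    simp only [Int.sub_zero, List.map_map, List.nil_append]
    apply List.map_congr_left
    intro i _
    simp only [Function.comp_apply]
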